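-- pv_equiv track=rewrite | github.com/peddy100/Test_driven_development | task.py | conv_hex
-- ===== SOURCE A (Python) =====
-- def str_to_num(num_str: str):
--     """Takes a str representing a num and converts it to an number"""
--     map = {
--         "0": 0,
--         "1": 1,
--         "2": 2,
--         "3": 3,
--         "4": 4,
--         "5": 5,
--         "6": 6,
--         "7": 7,
--         "8": 8,
--         "9": 9,
--         "a": 10,
--         "b": 11,
--         "c": 12,
--         "d": 13,
--         "e": 14,
--         "f": 15,
--     }
--     if num_str in map.keys():
--         return map[num_str]
--     return None
--
-- def conv_hex(hex_str: str, sign: int):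
--     """Converts a str representing a hex to an int"""
--     result = 0
--     power = 0
--     for num in hex_str[::-1]:
--         if str_to_num(num) is not None:
--             result += str_to_num(num) * (16 ** power)
--             power += 1
--             continue
--         return None
--     return sign * result
-- ===== SOURCE B (Python) =====
-- def conv_hex(hex_str: str, sign: int):
--     """Converts a str representing a hex to an int (Horner's method, left-to-right)."""
--     result = 0
--     for ch in hex_str:
--         if '0' <= ch <= '9':
--             result = result * 16 + (ord(ch) - 48)
--         elif 'a' <= ch <= 'f':
--             result = result * 16 + (ord(ch) - 87)
--         else:
--             return None
--     return sign * result
-- ===== Notes on version B (the rewrite author's own statement) =====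
-- stated objective: faster
-- what changed: Replaced the reversed-string traversal that recomputes 16**power and does a dict lookup per digit by a left-to-right Horner accumulation (result = result*16 + digit) with character-range arithmetic instead of the dict.
import Mathlib
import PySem

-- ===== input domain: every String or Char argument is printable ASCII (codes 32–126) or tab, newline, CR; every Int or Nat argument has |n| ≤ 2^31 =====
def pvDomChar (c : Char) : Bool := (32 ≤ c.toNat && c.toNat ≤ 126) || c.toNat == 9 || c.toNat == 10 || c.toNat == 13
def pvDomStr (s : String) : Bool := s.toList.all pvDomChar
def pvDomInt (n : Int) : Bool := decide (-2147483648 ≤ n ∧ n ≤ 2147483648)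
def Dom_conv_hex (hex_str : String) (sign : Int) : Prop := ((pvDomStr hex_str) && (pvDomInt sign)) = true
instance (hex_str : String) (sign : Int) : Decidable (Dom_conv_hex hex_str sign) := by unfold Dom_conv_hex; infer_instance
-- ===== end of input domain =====

-- B replaces A's reversed traversal (dict lookup + fresh 16**power per digit) by left-to-right Horner accumulation with character-range arithmetic (objective: faster, measured).

-- ===== PORT A =====
-- A's str_to_num: a dict literal mapping the 16 lowercase hex digit (one-char) strings to their values.
def strToNumMap : PySem.Dict Char Int :=
  PySem.Dict.ofList [('0',0),('1',1),('2',2),('3',3),('4',4),('5',5),('6',6),('7',7),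
                     ('8',8),('9',9),('a',10),('b',11),('c',12),('d',13),('e',14),('f',15)]

def str_to_num (c : Char) : Option Int :=
  strToNumMap.get? c   -- 'if num_str in map.keys(): return map[num_str]; return None' = lookup or None

-- the for-loop over hex_str[::-1] with state (result, power); 'return None' on an invalid char
def convHexLoopA : List Char → Int → Nat → Option Int
  | [], result, _ => some result
  | c :: rest, result, power =>
    match str_to_num c with
    | some v => convHexLoopA rest (result + v * (16 : Int) ^ power) (power + 1)
    | none => none

def conv_hex (hex_str : String) (sign : Int) : Option Int :=
  -- hex_str[::-1] is PySem.List.slice? … (-1); the .getD [] only totalizes (step -1 never yields none)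
  match convHexLoopA ((PySem.List.slice? hex_str.toList none none (-1)).getD []) 0 0 with
  | some result => some (sign * result)
  | none => none

-- ===== PORT B =====
-- B's digit decoder: '0' <= ch <= '9' → ord-48, 'a' <= ch <= 'f' → ord-87, else None
def hexVal (c : Char) : Option Int :=
  if '0' ≤ c ∧ c ≤ '9' then some ((c.toNat : Int) - 48)
  else if 'a' ≤ c ∧ c ≤ 'f' then some ((c.toNat : Int) - 87)
  else none

-- B's loop: left-to-right over hex_str, result = result*16 + digit
def convHexLoopB : List Char → Int → Option Int
  | [], result => some result
  | c :: rest, result =>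
    match hexVal c with
    | some v => convHexLoopB rest (result * 16 + v)
    | none => none

def conv_hex_alt (hex_str : String) (sign : Int) : Option Int :=
  match convHexLoopB hex_str.toList 0 with
  | some result => some (sign * result)
  | none => none

-- ===== PRECONDITION & SPEC =====
def Spec_conv_hex (hex_str : String) (sign : Int) (out : Option Int) : Prop := out = conv_hex_alt hex_str sign
instance (hex_str : String) (sign : Int) (out : Option Int) : Decidable (Spec_conv_hex hex_str sign out) := by unfold Spec_conv_hex; infer_instance

-- ===== CLAIM (what is proved, stated in full; the proofs are below) =====
def Claim_equal_conv_hex : Prop := ∀ (hex_str : String) (sign : Int), Dom_conv_hex hex_str sign → Spec_conv_hex hex_str sign (conv_hex hex_str sign)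

-- ===== LEMMAS AND PROOFS =====

lemma char_le_iff (a b : Char) : a ≤ b ↔ a.toNat ≤ b.toNat := by
  rw [Char.le_def]; exact UInt32.le_iff_toNat_le ..

lemma char_eq_iff (a b : Char) : a = b ↔ a.toNat = b.toNat := by
  constructor
  · rintro rfl; rfl
  · intro h; exact Char.ext (UInt32.toNat.inj h)

lemma strToNumMap_eq : strToNumMap = PySem.Dict.mk
    [('0',0),('1',1),('2',2),('3',3),('4',4),('5',5),('6',6),('7',7),
     ('8',8),('9',9),('a',10),('b',11),('c',12),('d',13),('e',14),('f',15)] := by decide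

-- the two digit decoders agree on every character
set_option maxHeartbeats 2000000 in
lemma str_to_num_eq_hexVal (c : Char) : str_to_num c = hexVal c := by
  simp only [str_to_num, strToNumMap_eq, hexVal, PySem.Dict.get?_mk_cons,
    char_le_iff, beq_iff_eq, char_eq_iff]
  simp only [show ('0').toNat = 48 from rfl, show ('1').toNat = 49 from rfl, show ('2').toNat = 50 from rfl, show ('3').toNat = 51 from rfl, show ('4').toNat = 52 from rfl, show ('5').toNat = 53 from rfl, show ('6').toNat = 54 from rfl, show ('7').toNat = 55 from rfl, show ('8').toNat = 56 from rfl, show ('9').toNat = 57 from rfl, show ('a').toNat = 97 from rfl, show ('b').toNat = 98 from rfl, show ('c').toNat = 99 from rfl, show ('d').toNat = 100 from rfl, show ('e').toNat = 101 from rfl, show ('f').toNat = 102 from rfl, show (PySem.Dict.mk ([] : List (Char × Int))).get? c = none from rfl]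
  generalize c.toNat = n
  by_cases h : 48 ≤ n ∧ n ≤ 57
  · obtain ⟨h1, h2⟩ := h
    interval_cases n <;> decide
  · by_cases h' : 97 ≤ n ∧ n ≤ 102
    · obtain ⟨h1, h2⟩ := h'
      interval_cases n <;> decide
    · rw [if_neg (show ¬(48 = n) by omega), if_neg (show ¬(49 = n) by omega), if_neg (show ¬(50 = n) by omega), if_neg (show ¬(51 = n) by omega), if_neg (show ¬(52 = n) by omega), if_neg (show ¬(53 = n) by omega), if_neg (show ¬(54 = n) by omega), if_neg (show ¬(55 = n) by omega), if_neg (show ¬(56 = n) by omega), if_neg (show ¬(57 = n) by omega), if_neg (show ¬(97 = n) by omega), if_neg (show ¬(98 = n) by omega), if_neg (show ¬(99 = n) by omega), if_neg (show ¬(100 = n) by omega), if_neg (show ¬(101 = n) by omega), if_neg (show ¬(102 = n) by omega), if_neg h, if_neg h']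

-- A's loop over xs ++ [c]: the last char contributes at power p + |xs|
lemma convHexLoopA_append (xs : List Char) (c : Char) (r : Int) (p : Nat) :
    convHexLoopA (xs ++ [c]) r p =
      match convHexLoopA xs r p, str_to_num c with
      | some r', some v => some (r' + v * (16 : Int) ^ (p + xs.length))
      | _, _ => none := by
  induction xs generalizing r p with
  | nil =>
    simp only [List.nil_append, convHexLoopA, List.length_nil, Nat.add_zero]
    cases str_to_num c <;> rfl
  | cons x xs ih =>
    simp only [List.cons_append, convHexLoopA]
    cases str_to_num x with
    | none => cases str_to_num c <;> rfl
    | some v =>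
      dsimp only
      rw [ih]
      cases convHexLoopA xs (r + v * (16:Int) ^ p) (p+1) <;> cases str_to_num c <;>
          (dsimp only; try rfl)
      simp only [List.length_cons, Option.some.injEq]
      ring_nf

-- main invariant: Horner left-to-right equals A's powers-of-16 pass over the reverse
lemma loopB_eq_loopA (l : List Char) (acc : Int) :
    convHexLoopB l acc =
      (convHexLoopA l.reverse 0 0).map (fun r => acc * (16 : Int) ^ l.length + r) := by
  induction l generalizing acc with
  | nil => simp [convHexLoopB, convHexLoopA]
  | cons c rest ih =>
    simp only [convHexLoopB, List.reverse_cons]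
    cases h : hexVal c with
    | none =>
      rw [convHexLoopA_append, str_to_num_eq_hexVal c, h]
      cases convHexLoopA rest.reverse 0 0 <;> rfl
    | some v =>
      dsimp only
      rw [ih, convHexLoopA_append, str_to_num_eq_hexVal c, h]
      cases convHexLoopA rest.reverse 0 0 with
      | none => rfl
      | some r' =>
        simp only [Option.map_some, List.length_reverse, Nat.zero_add, List.length_cons,
          Option.some.injEq]
        ring

theorem conv_hex_eq_alt (hex_str : String) (sign : Int) :
    conv_hex hex_str sign = conv_hex_alt hex_str sign := by
  unfold conv_hex conv_hex_alt
  rw [PySem.List.slice?_none_none_neg_one]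
  simp only [Option.getD_some]
  rw [loopB_eq_loopA]
  cases convHexLoopA hex_str.toList.reverse 0 0 <;> simp

-- ===== VERDICT (by name: the statement is the Claim_ definition above) =====
theorem conv_hex_spec : Claim_equal_conv_hex := by
  intro hex_str sign _
  unfold Spec_conv_hex
  exact conv_hex_eq_alt hex_str sign
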